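-- pv_equiv track=rewrite | github.com/beniclyde/beniclyde.github.io | DNA Manipulation/DNA.py | codons
-- ===== SOURCE A (Python) =====
-- def transcribe(dna):
--     """
--     Transcribes a DNA sequence by replacing thymine (T) with uracil (U)
--     """
--     return dna.replace('T', 'U')
--
-- def complement(sequence):
--     """
--     Finds the complement of the sequence by list comprehension using dictionary of complement values
--     """
--     basecomplement = {'A': 'T', 'C': 'G', 'T': 'A', 'G': 'C', 'U': 'A', 'N': 'N'}
--     bases = list(sequence)
--     comp = [basecomplement[base] for base in bases]
--     return ''.join(comp)
--
-- def codons(sequence, rf=0):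
--     """
--     Finds the list of codons in a sequence in a given reading frame.
--
--     In a sequence there are 6 possible reading frames, 3 on the forward strand, 3 on the complement.
--     Arguments: sequence for splitting in to codons
--     rf: reading frame. 0 = 1st forward frame; 1 = 2nd forward frame; 2 = 3rd forward frame
--         3 = 1st complement frame; 4 = 2nd complement frame; 5 = 3rd complement frame
--     Returns: list of codons in sequence for specified reading frame
--     """
--     if rf == 0:
--         stoppoint = len(sequence) - (len(sequence) % 3)
--         return [sequence[i:i+3] for i in range(rf, stoppoint, 3)]
--     if rf == 1:
--         stoppoint = len(sequence[rf:]) - (len(sequence[rf:]) % 3)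
--         return [sequence[i:i+3] for i in range(rf, stoppoint, 3)]
--     if rf == 2:
--         stoppoint = len(sequence[2:]) - (len(sequence[2:]) % 3)
--         return [sequence[i:i+3] for i in range(rf, stoppoint, 3)]
--     if rf == 3 or rf == 4 or rf == 5:
--         new_s = transcribe(complement(sequence))
--         stoppoint = len(new_s[rf-3:]) - (len(new_s[rf-3:]) % 3)
--         return [new_s[i:i+3] for i in range(rf-3, stoppoint, 3)]
--     else:
--         raise ValueError("Reading frame rf must be a value from 0-5")
-- ===== SOURCE B (Python) =====
-- def codons(sequence, rf=0):
--     """Single unified path: pick strand by rf, then chop the offset tail into 3-chunks."""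
--     if rf < 0 or rf > 5:
--         raise ValueError("Reading frame rf must be a value from 0-5")
--     if rf >= 3:
--         # complement followed by T->U transcription, fused into one table
--         table = {'A': 'U', 'C': 'G', 'T': 'A', 'G': 'C', 'U': 'A', 'N': 'N'}
--         sequence = ''.join(table[c] for c in sequence)
--     s = sequence[rf % 3:]
--     out = []
--     while len(s) >= 3:
--         out.append(s[:3])
--         s = s[3:]
--     return out
-- ===== Notes on version B (the rewrite author's own statement) =====
-- stated objective: simpler
-- what changed: Replaces the four per-frame branches with one unified path (strand choice + offset = rf % 3), fuses complement+transcribe into a single lookup table and one pass, and emits codons by repeatedly slicing the head off the tail instead of indexing an arithmetic range.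
import Mathlib
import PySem

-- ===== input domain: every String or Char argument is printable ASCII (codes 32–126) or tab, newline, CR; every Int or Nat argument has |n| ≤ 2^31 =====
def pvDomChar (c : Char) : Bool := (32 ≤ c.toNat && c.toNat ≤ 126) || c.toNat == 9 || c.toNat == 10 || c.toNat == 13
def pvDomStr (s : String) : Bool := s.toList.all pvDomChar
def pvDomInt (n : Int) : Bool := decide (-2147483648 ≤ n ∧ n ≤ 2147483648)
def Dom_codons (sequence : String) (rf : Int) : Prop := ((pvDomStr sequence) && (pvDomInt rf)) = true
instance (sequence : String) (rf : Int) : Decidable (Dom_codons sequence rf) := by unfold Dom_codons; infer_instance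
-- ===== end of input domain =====

-- B collapses A's four per-frame branches into one path (strand choice + offset = rf % 3),
-- fuses complement+transcribe into one table and chops the tail into 3-chunks by slicing (simpler).


-- ===== PORT A =====
def pvTranscribe (dna : String) : String := PySem.Str.replace dna "T" "U"

-- the Python dict maps one-character strings; ported with Char keys/values (exact on 1-char strings)
def pvBasecomplement : PySem.Dict Char Char :=
  PySem.Dict.ofList [('A', 'T'), ('C', 'G'), ('T', 'A'), ('G', 'C'), ('U', 'A'), ('N', 'N')]

-- a base outside the dict raises KeyError in Python (rf 3-5); Pre_codons excludes those inputs,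
-- so the getD default is never reached on admitted inputs
def pvComplement (sequence : String) : String :=
  let bases := sequence.toList
  let comp := bases.map (fun base => (pvBasecomplement.get? base).getD base)
  String.ofList comp

def codons (sequence : String) (rf : Int) : List String :=
  if rf = 0 then
    let stoppoint := PySem.Str.len sequence - PySem.Int.mod (PySem.Str.len sequence) 3
    (PySem.List.pyRange rf stoppoint 3).map
      (fun i => PySem.Str.slice sequence (some i) (some (i + 3)))
  else if rf = 1 then
    let t := PySem.Str.slice sequence (some rf) none
    let stoppoint := PySem.Str.len t - PySem.Int.mod (PySem.Str.len t) 3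
    (PySem.List.pyRange rf stoppoint 3).map
      (fun i => PySem.Str.slice sequence (some i) (some (i + 3)))
  else if rf = 2 then
    let t := PySem.Str.slice sequence (some 2) none
    let stoppoint := PySem.Str.len t - PySem.Int.mod (PySem.Str.len t) 3
    (PySem.List.pyRange rf stoppoint 3).map
      (fun i => PySem.Str.slice sequence (some i) (some (i + 3)))
  else if rf = 3 ∨ rf = 4 ∨ rf = 5 then
    let new_s := pvTranscribe (pvComplement sequence)
    let t := PySem.Str.slice new_s (some (rf - 3)) none
    let stoppoint := PySem.Str.len t - PySem.Int.mod (PySem.Str.len t) 3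
    (PySem.List.pyRange (rf - 3) stoppoint 3).map
      (fun i => PySem.Str.slice new_s (some i) (some (i + 3)))
  else []  -- Python raises ValueError here; excluded by Pre_codons

-- ===== PORT B =====
def pvTable : PySem.Dict Char Char :=
  PySem.Dict.ofList [('A', 'U'), ('C', 'G'), ('T', 'A'), ('G', 'C'), ('U', 'A'), ('N', 'N')]

-- Source B's while loop: peel s[:3] off while len(s) >= 3
def pvChunk3 (s : List Char) : List String :=
  if h : 3 ≤ s.length then String.ofList (s.take 3) :: pvChunk3 (s.drop 3) else []
termination_by s.length
decreasing_by simp [List.length_drop]; omega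

def codons_alt (sequence : String) (rf : Int) : List String :=
  if rf < 0 ∨ 5 < rf then []  -- Python raises ValueError here; excluded by Pre_codons
  else
    -- a base outside the table raises KeyError in Python; excluded by Pre_codons (default unreached)
    let seq := if 3 ≤ rf then
        String.ofList (sequence.toList.map (fun c => (pvTable.get? c).getD c))
      else sequence
    pvChunk3 (PySem.Str.slice seq (some (PySem.Int.mod rf 3)) none).toList

-- ===== PRECONDITION & SPEC =====
-- Pre_ excludes exactly the inputs where A raises: rf outside 0..5 (ValueError) and, for the
-- complement frames rf = 3,4,5, any character that is not a key of the base-complement dict (KeyError).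
def Pre_codons (sequence : String) (rf : Int) : Prop :=
  (0 ≤ rf ∧ rf ≤ 5) ∧
    (3 ≤ rf → sequence.toList.all (fun c => c ∈ (['A', 'C', 'T', 'G', 'U', 'N'] : List Char)) = true)
instance (sequence : String) (rf : Int) : Decidable (Pre_codons sequence rf) := by
  unfold Pre_codons; infer_instance

def pvWitness_codons : String × Int := ("A", 4)

def Spec_codons (sequence : String) (rf : Int) (out : List String) : Prop := out = codons_alt sequence rf
instance (sequence : String) (rf : Int) (out : List String) : Decidable (Spec_codons sequence rf out) := by unfold Spec_codons; infer_instance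

-- ===== CLAIM (what is proved, stated in full; the proofs are below) =====
def Claim_equal_codons : Prop := ∀ (sequence : String) (rf : Int), Dom_codons sequence rf → Pre_codons sequence rf → Spec_codons sequence rf (codons sequence rf)

-- ===== LEMMAS AND PROOFS =====

-- B's chunk loop in closed form
lemma pvChunk3_eq (q : Nat) : ∀ (s : List Char), s.length / 3 = q →
    pvChunk3 s = (List.range q).map (fun k => String.ofList ((s.drop (3 * k)).take 3)) := by
  induction q with
  | zero =>
    intro s h
    rw [pvChunk3]
    have : ¬ 3 ≤ s.length := by omega
    simp [this]
  | succ q ih =>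
    intro s h
    have h3 : 3 ≤ s.length := by omega
    rw [pvChunk3, dif_pos h3, ih (s.drop 3) (by simp [List.length_drop]; omega)]
    rw [List.range_succ_eq_map]
    simp only [List.map_cons, List.map_map]
    congr 1
    refine List.map_congr_left fun k _ => ?_
    simp only [Function.comp_apply, List.drop_drop]
    have e : 3 + 3 * k = 3 * (k + 1) := by ring
    rw [e]

-- range(off, 3*q, 3) for 0 ≤ off < 3
lemma pvRange3 (q : Nat) (off : Int) (h0 : 0 ≤ off) (h3 : off < 3) :
    PySem.List.pyRange off (3 * (q : Int)) 3 =
      (List.range q).map (fun k : Nat => off + 3 * (k : Int)) := by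
  rw [PySem.List.pyRange_of_pos _ _ (by norm_num)]
  rcases Nat.eq_zero_or_pos q with hq | hq
  · subst hq; simp; omega
  · have hlt : off < 3 * (q : Int) := by omega
    rw [if_pos hlt]
    have : ((3 * (q : Int) - off + 3 - 1) / 3).toNat = q := by omega
    rw [this]

-- the common frame: A's range/slice comprehension over offset off equals B's chunking of the tail
lemma pvBranch (seqS : String) (off : Int) (h0 : 0 ≤ off) (h3 : off < 3) :
    (PySem.List.pyRange off
        (PySem.Str.len (PySem.Str.slice seqS (some off) none) -
          PySem.Int.mod (PySem.Str.len (PySem.Str.slice seqS (some off) none)) 3) 3).map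
      (fun i => PySem.Str.slice seqS (some i) (some (i + 3)))
    = pvChunk3 ((PySem.Str.slice seqS (some off) none).toList) := by
  have hbridge : (PySem.Str.slice seqS (some off) none).toList = seqS.toList.drop off.toNat := by
    simp [PySem.Str.toList_slice, PySem.List.slice_from _ h0]
  have hlen : PySem.Str.len (PySem.Str.slice seqS (some off) none) =
      ((seqS.toList.length - off.toNat : Nat) : Int) := by
    simp [PySem.Str.len_eq, hbridge]
  rw [hlen, hbridge]
  have hstop : ((seqS.toList.length - off.toNat : Nat) : Int) -
      PySem.Int.mod ((seqS.toList.length - off.toNat : Nat) : Int) 3 =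
      3 * (((seqS.toList.length - off.toNat) / 3 : Nat) : Int) := by
    rw [PySem.Int.mod_eq_emod_of_pos (by norm_num)]
    push_cast
    omega
  rw [hstop]
  have hoffj : off = (off.toNat : Int) := by omega
  rw [hoffj, pvRange3 _ _ (by positivity) (by omega),
    pvChunk3_eq ((seqS.toList.length - off.toNat) / 3) _ (by simp [List.length_drop]; omega),
    List.map_map]
  refine List.map_congr_left fun k hk => ?_
  apply String.toList_injective
  simp only [Function.comp_apply]
  rw [PySem.Str.toList_slice]
  simp only [PySem.Chars.slice_eq_listSlice]
  rw [PySem.List.slice_toNat _ (by positivity) (by positivity)]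
  rw [String.toList_ofList, List.drop_drop]
  have ha : ((off.toNat : Int) + 3 * (k : Int)).toNat = off.toNat + 3 * k := by omega
  have hb : ((off.toNat : Int) + 3 * (k : Int) + 3).toNat = off.toNat + 3 * k + 3 := by omega
  rw [ha, hb]
  have h3' : off.toNat + 3 * k + 3 - (off.toNat + 3 * k) = 3 := by omega
  rw [h3', show off.toNat + 3 * k = 3 * k + off.toNat from by ring]
  simp only [Int.toNat_natCast]
  rw [Nat.add_comm]

-- A's stoppoint for rf = 0 equals the sliced-tail form for off = 0
lemma pvLen0 (seqS : String) :
    PySem.Str.len seqS = PySem.Str.len (PySem.Str.slice seqS (some 0) none) := by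
  simp [PySem.Str.len_eq, PySem.Str.toList_slice, PySem.List.slice_none_none]

-- Chars.replace.go on the single-character pattern 'T' is a pointwise map
lemma pvGoTU : ∀ (fuel : Nat) (l acc : List Char), l.length ≤ fuel →
    PySem.Chars.replace.go ['T'] ['U'] fuel l acc =
      acc.reverse ++ l.map (fun c => if c = 'T' then 'U' else c) := by
  intro fuel
  induction fuel with
  | zero =>
    intro l acc h
    have hl : l = [] := List.eq_nil_of_length_eq_zero (by omega)
    subst hl
    simp [PySem.Chars.replace.go]
  | succ fuel ih =>
    intro l acc h
    cases l with
    | nil => simp [PySem.Chars.replace.go]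
    | cons c t =>
      rw [PySem.Chars.replace.go]
      by_cases hc : c = 'T'
      · subst hc
        have hpre : List.isPrefixOf ['T'] ('T' :: t) = true := by simp [List.isPrefixOf]
        simp only [hpre, if_true]
        rw [ih _ _ (by simpa using Nat.le_of_succ_le_succ (by simpa using h))]
        simp
      · have hpre : List.isPrefixOf ['T'] (c :: t) = false := by
          simp [List.isPrefixOf]
          exact fun h' => hc h'.symm
        simp only [hpre, Bool.false_eq_true, if_false]
        rw [ih _ _ (by simpa using h)]
        simp [hc]

-- transcribe ∘ complement equals B's fused table, character by character, on ACTGUN strings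
lemma pvFuse (seqS : String)
    (hch : ∀ c ∈ seqS.toList, c ∈ (['A', 'C', 'T', 'G', 'U', 'N'] : List Char)) :
    pvTranscribe (pvComplement seqS) =
      String.ofList (seqS.toList.map (fun c => (pvTable.get? c).getD c)) := by
  apply String.toList_injective
  unfold pvTranscribe pvComplement
  simp only [PySem.Str.toList_replace, String.toList_ofList,
    show ("T" : String).toList = ['T'] from rfl, show ("U" : String).toList = ['U'] from rfl]
  rw [PySem.Chars.replace]
  simp only [List.isEmpty_cons, Bool.false_eq_true, if_false]
  rw [pvGoTU _ _ _ le_rfl, List.reverse_nil, List.nil_append, List.map_map]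
  refine List.map_congr_left fun c hc => ?_
  have hc6 := hch c hc
  fin_cases hc6 <;> decide

-- ===== VERDICT (by name: the statement is the Claim_ definition above) =====
theorem codons_spec : Claim_equal_codons := by
  intro seq rf _ hpre
  obtain ⟨⟨h0, h5⟩, hch⟩ := hpre
  unfold Spec_codons codons codons_alt
  interval_cases rf
  · split_ifs
    all_goals try omega
    rw [pvLen0 seq, show PySem.Int.mod 0 3 = (0 : Int) from rfl]
    exact pvBranch seq 0 (by norm_num) (by norm_num)
  · split_ifs
    all_goals try omega
    rw [show PySem.Int.mod 1 3 = (1 : Int) from rfl]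
    exact pvBranch seq 1 (by norm_num) (by norm_num)
  · split_ifs
    all_goals try omega
    rw [show PySem.Int.mod 2 3 = (2 : Int) from rfl]
    exact pvBranch seq 2 (by norm_num) (by norm_num)
  · split_ifs
    all_goals try omega
    rw [pvFuse seq (by simpa using hch (by norm_num)), show PySem.Int.mod 3 3 = (0 : Int) from rfl,
      show (3 : Int) - 3 = 0 from rfl]
    exact pvBranch _ 0 (by norm_num) (by norm_num)
  · split_ifs
    all_goals try omega
    rw [pvFuse seq (by simpa using hch (by norm_num)), show PySem.Int.mod 4 3 = (1 : Int) from rfl,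
      show (4 : Int) - 3 = 1 from rfl]
    exact pvBranch _ 1 (by norm_num) (by norm_num)
  · split_ifs
    all_goals try omega
    rw [pvFuse seq (by simpa using hch (by norm_num)), show PySem.Int.mod 5 3 = (2 : Int) from rfl,
      show (5 : Int) - 3 = 2 from rfl]
    exact pvBranch _ 2 (by norm_num) (by norm_num)
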